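-- pv_equiv track=rewrite | github.com/SamAng219255/Python | MUDthing/utility.py | mtlist
-- ===== SOURCE A (Python) =====
-- def tlist(listed):
-- 	finalList=[]
-- 	for i in range(len(listed)):
-- 		if(listed[i][1]>0 and listed[i][0]!=""):
-- 			finalList.append(listed[i])
-- 	textListAND = ""
-- 	if(len(finalList)>1):
-- 		for i in range(len(finalList)-1):
-- 			if(finalList[i][1]==1):
-- 				if finalList[i][0][0] in ["a","e","i","o","u","A","E","I","O","U"]:
-- 					textListAND+="an "
-- 				else:
-- 					textListAND+="a "
-- 			elif(finalList[i][1]>1):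
-- 				textListAND+=(str(finalList[i][1])+" ")
-- 			textListAND+=(finalList[i][0]+"")
-- 			if(finalList[i][1]>1):
-- 				if(len(finalList[i])==3 or finalList[i][3] == False):
-- 					lastCharacter=str(finalList[i][0])[len(list(finalList[i][0]))-1];
-- 					slastCharacter=str(finalList[i][0])[len(list(finalList[i][0]))-2];
-- 					if lastCharacter in ["s","S","h","H","ʒ","Ʒ"]:
-- 						textListAND+="es"
-- 					elif (lastCharacter in ["y","Y"]) and not (slastCharacter in ["a","i","o","u","y","A","I","O","U","Y"]):
-- 						textListAND=textListAND[0: -1]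
-- 						if slastCharacter in ["e","E"]:
-- 							textListAND=textListAND[0:-1]
-- 						textListAND+="ies"
-- 					else:
-- 						textListAND+="s"
-- 			if type(finalList[i][2]) == type(""):
-- 				textListAND+=finalList[i][2]
-- 			if(len(finalList)>2):
-- 				textListAND+=", "
-- 			else:
-- 				textListAND+=" "
-- 		i+=1
-- 		finalWord=finalList[len(finalList)-1][0]
-- 		textListAND+="and "
-- 		if(finalList[i][1]==1):
-- 			if finalWord[0] in ["a","e","i","o","u","A","E","I","O","U"]:
-- 				textListAND+="an "
-- 			else:
-- 				textListAND+="a "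
-- 		elif(finalList[i][1]>1):
-- 			textListAND+=(str(finalList[i][1])+" ")
-- 		textListAND+=finalWord
-- 		if(finalList[i][1]>1):
-- 			if(len(finalList[i])==3 or finalList[i][3] == False):
-- 				lastCharacter=finalWord[len(finalWord)-1];
-- 				slastCharacter=finalWord[len(finalWord)-2];
-- 				if lastCharacter in ["s","S","h","H","ʒ","Ʒ"]:
-- 					textListAND+="es"
-- 				elif (lastCharacter in ["y","Y"]) and not (slastCharacter in ["a","i","o","u","y","A","I","O","U","Y"]):
-- 					textListAND=textListAND[0:-1]
-- 					if slastCharacter in ["e","E"]: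
-- 						textListAND=textListAND[0:-1]
-- 					textListAND+="ies"
-- 				else:
-- 					textListAND+="s"
-- 		if(type(finalList[i][2]) == type("")):
-- 			textListAND+=finalList[i][2]
-- 		return textListAND
-- 	elif(len(finalList)==1):
-- 		if(finalList[0][1]==1):
-- 			if(finalList[0][0][0] in ["a","e","i","o","u","A","E","I","O","U"]):
-- 				textListAND+="an "
-- 			else:
-- 				textListAND+="a "
-- 		elif(finalList[0][1]>1):
-- 			textListAND+=(str(finalList[0][1])+" ")
-- 		textListAND+=finalList[0][0]
-- 		if(finalList[0][1]>1):
-- 			if(len(finalList[0])==3 or finalList[0][3] == False):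
-- 				lastCharacter=finalList[0][0][len(finalList[0][0])-1]
-- 				slastCharacter=finalList[0][0][len(finalList[0][0])-2]
-- 				if(lastCharacter in ["s","S","h","H","ʒ","Ʒ"]):
-- 					textListAND+="es"
-- 				elif(lastCharacter in ["y","Y"]) and not (slastCharacter in ["a","i","o","u","y","A","I","O","U","Y"]):
-- 					textListAND=textListAND[0:-1]
-- 					if slastCharacter in ["e","E"]:
-- 						textListAND=textListAND[0:-1]
-- 					textListAND+="ies"
-- 				else:
-- 					textListAND+="s"
-- 		if type(finalList[0][2]) == type(""):
-- 			textListAND+=finalList[i][2]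
-- 		return textListAND
-- 	else:
-- 		return "nothing"
--
-- def mtlist(listed):
--     temp=[]
--     stor=[]
--     for elem in listed:
--         if not (elem in stor):
--             stor.append(elem)
--             temp.append([elem,1,""])
--         else:
--             temp[stor.index(elem)][1]+=1
--     return tlist(temp)
-- ===== SOURCE B (Python) =====
-- def _plural(name):
--     last = name[len(name) - 1]
--     slast = name[len(name) - 2]
--     if last in "sShH\u0292\u01b7":
--         return name + "es"
--     if last in "yY" and slast not in "aiouyAIOUY":
--         stem = name[:-1]
--         if slast in "eE":
--             stem = stem[:-1]
--         return stem + "ies"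
--     return name + "s"
--
-- def _phrase(name, n):
--     if n == 1:
--         return ("an " if name[0] in "aeiouAEIOU" else "a ") + name
--     return str(n) + " " + _plural(name)
--
-- def mtlist(listed):
--     seen = []
--     for e in listed:
--         if e not in seen:
--             seen.append(e)
--     names = [e for e in seen if e != ""]
--     if not names:
--         return "nothing"
--     phrases = [_phrase(e, listed.count(e)) for e in names]
--     if len(phrases) == 1:
--         return phrases[0]
--     sep = ", " if len(phrases) > 2 else " "
--     return sep.join(phrases[:-1]) + sep + "and " + phrases[-1]
-- ===== Notes on version B (the rewrite author's own statement) =====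
-- stated objective: simpler
-- what changed: A counts by maintaining a parallel index list and incrementing counter cells in place, then feeds the generic tlist formatter (accumulator string, in-place slicing, a triplicated article/plural block); B dedupes, counts each distinct name directly with list.count, renders one phrase per name via small article/plural helpers and joins the phrases with the separator and 'and'.
import Mathlib
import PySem

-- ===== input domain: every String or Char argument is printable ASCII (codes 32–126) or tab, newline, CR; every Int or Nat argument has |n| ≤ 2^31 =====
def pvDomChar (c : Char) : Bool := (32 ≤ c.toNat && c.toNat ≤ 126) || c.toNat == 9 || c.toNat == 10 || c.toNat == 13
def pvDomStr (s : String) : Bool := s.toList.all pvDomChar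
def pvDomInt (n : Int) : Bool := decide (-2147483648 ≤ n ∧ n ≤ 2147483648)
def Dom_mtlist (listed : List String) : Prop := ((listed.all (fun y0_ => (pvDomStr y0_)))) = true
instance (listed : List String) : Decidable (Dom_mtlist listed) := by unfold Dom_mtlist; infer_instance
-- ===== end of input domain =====

-- B replaces A's pipeline (incremental index+counter accumulation, then the generic tlist
-- formatter with its accumulator string, in-place slicing and triplicated article/plural blocks)
-- by direct phrase construction: dedupe, count each distinct name with .count, render one phrase
-- per name via small article/plural helpers, and join the phrases with sep/"and".
-- Return-value equivalence only (no argument mutation here).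

-- ===== PORT A =====
-- A delegates to the same-module helper tlist; entries are always 3-element lists
-- [name, num, tag] with tag = "", so Python's `len(entry)==3` test is identically True and
-- `type(entry[2])==str` is identically True — both are ported as such.
def pvVowels : List Char := ['a','e','i','o','u','A','E','I','O','U']
def pvEsChars : List Char := ['s','S','h','H','ʒ','Ʒ']
def pvYBlock : List Char := ['a','i','o','u','y','A','I','O','U','Y']

-- the a/an-or-number + name + pluralisation block of tlist (it appears verbatim three times in
-- the Python; the trailing tag append is done at each call site, as in the Python)
def pvItemText (t : String) (e : String × Int × String) : String :=
  let name := e.1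
  let num := e.2.1
  let t :=
    if num = 1 then
      if pvVowels.contains ((PySem.Str.pyGet? name 0).getD ' ') then t ++ "an " else t ++ "a "
    else if num > 1 then t ++ PySem.Int.toStr num ++ " " else t
  let t := t ++ name
  if num > 1 then
    let lastC := (PySem.Str.pyGet? name (PySem.Str.len name - 1)).getD ' '
    let slastC := (PySem.Str.pyGet? name (PySem.Str.len name - 2)).getD ' '
    if pvEsChars.contains lastC then t ++ "es"
    else if (lastC = 'y' ∨ lastC = 'Y') ∧ ¬ pvYBlock.contains slastC then
      let t := PySem.Str.slice t none (some (-1))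
      let t := if slastC = 'e' ∨ slastC = 'E' then PySem.Str.slice t none (some (-1)) else t
      t ++ "ies"
    else t ++ "s"
  else t

def pvTlist (listed : List (String × Int × String)) : String :=
  let finalList := listed.foldl (fun acc e => if e.2.1 > 0 ∧ e.1 ≠ "" then acc ++ [e] else acc) []
  if finalList.length > 1 then
    let t := (List.range (finalList.length - 1)).foldl (fun t i =>
      let e := finalList.getD i ("", 0, "")
      let t := pvItemText t e
      let t := t ++ e.2.2
      if finalList.length > 2 then t ++ ", " else t ++ " ") ""
    -- after `i += 1`, i = len(finalList) - 1 (the last entry; finalWord is its name)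
    let e := finalList.getD (finalList.length - 1) ("", 0, "")
    let t := t ++ "and "
    let t := pvItemText t e
    t ++ e.2.2
  else if finalList.length = 1 then
    let e := finalList.getD 0 ("", 0, "")
    let t := pvItemText "" e
    -- the Python appends finalList[i][2] where i is the FIRST loop's last value len(listed)-1;
    -- pyGet? is none exactly where Python raises IndexError (those inputs are outside Pre_)
    t ++ ((PySem.List.pyGet? finalList (PySem.List.len listed - 1)).map (·.2.2)).getD ""
  else "nothing"

-- A's counting loop: temp grows with [elem,1,""]; a repeat increments temp[stor.index(elem)][1]
def mtlistLoop (xs : List String) (temp : List (String × Int × String)) (stor : List String) :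
    List (String × Int × String) × List String :=
  match xs with
  | [] => (temp, stor)
  | e :: rest =>
    if ¬ (e ∈ stor) then
      mtlistLoop rest (temp ++ [(e, 1, "")]) (stor ++ [e])
    else
      mtlistLoop rest (temp.modify ((PySem.List.index? stor e).getD 0) (fun p => (p.1, p.2.1 + 1, p.2.2))) stor

def mtlist (listed : List String) : String :=
  pvTlist (mtlistLoop listed [] []).1

-- ===== PORT B =====
-- _plural: name[len-2] (negative wrap to the last char on 1-char names) — as in Source B
def pvPlural (name : String) : String :=
  let last := (PySem.Str.pyGet? name (PySem.Str.len name - 1)).getD ' '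
  let slast := (PySem.Str.pyGet? name (PySem.Str.len name - 2)).getD ' '
  if pvEsChars.contains last then name ++ "es"
  else if (last = 'y' ∨ last = 'Y') ∧ ¬ pvYBlock.contains slast then
    let stem := PySem.Str.slice name none (some (-1))
    let stem := if slast = 'e' ∨ slast = 'E' then PySem.Str.slice stem none (some (-1)) else stem
    stem ++ "ies"
  else name ++ "s"

def pvPhrase (name : String) (n : Int) : String :=
  if n = 1 then
    (if pvVowels.contains ((PySem.Str.pyGet? name 0).getD ' ') then "an " else "a ") ++ name
  else PySem.Int.toStr n ++ " " ++ pvPlural name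

def mtlist_alt (listed : List String) : String :=
  let seen := listed.foldl (fun s e => if e ∈ s then s else s ++ [e]) []
  let names := seen.filter (fun e => e ≠ "")
  if names.isEmpty then "nothing"
  else
    let phrases := names.map (fun e => pvPhrase e (listed.count e : Int))
    if phrases.length = 1 then phrases.getD 0 ""
    else
      let sep := if phrases.length > 2 then ", " else " "
      PySem.Str.join sep (PySem.List.slice phrases none (some (-1))) ++ sep ++ "and "
        ++ PySem.List.pyGetD phrases (-1) ""

-- ===== PRECONDITION & SPEC =====
-- Pre_ excludes exactly the inputs on which A raises IndexError (tlist's one-element branch reads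
-- finalList[i][2] with i left over from an earlier loop): lists that contain "" and have exactly
-- one distinct nonempty element; my B returns that element's phrase there.
def Pre_mtlist (listed : List String) : Prop :=
  ¬ ("" ∈ listed ∧ ((PySem.Set.ofList listed).filter (fun s => s ≠ "")).length = 1)
instance (listed : List String) : Decidable (Pre_mtlist listed) := by unfold Pre_mtlist; infer_instance
def pvWitness_mtlist : List String := ["apple", "pear", "pear"]

def Spec_mtlist (listed : List String) (out : String) : Prop := out = mtlist_alt listed
instance (listed : List String) (out : String) : Decidable (Spec_mtlist listed out) := by unfold Spec_mtlist; infer_instance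

-- ===== CLAIM (what is proved, stated in full; the proofs are below) =====
def Claim_equal_mtlist : Prop := ∀ (listed : List String), Dom_mtlist listed → Pre_mtlist listed → Spec_mtlist listed (mtlist listed)


-- ===== LEMMAS AND PROOFS =====

-- (A-loop characterisation) modifying the image of a nodup list at the index of a
theorem pvModifyMap (stor : List String) (g : String → String × Int × String)
    (F : String × Int × String → String × Int × String) (a : String)
    (hnd : stor.Nodup) (ha : a ∈ stor) :
    (stor.map g).modify ((PySem.List.index? stor a).getD 0) F
      = stor.map (fun e => if e = a then F (g e) else g e) := by
  induction stor with
  | nil => cases ha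
  | cons x rest ih =>
    rcases List.nodup_cons.mp hnd with ⟨hx, hnd'⟩
    by_cases hxa : x = a
    · subst hxa
      rw [PySem.List.index?_cons_self]
      simp only [Option.getD_some, List.map_cons, List.modify_zero_cons]
      congr 1
      exact (List.map_congr_left (fun e he => by
        rw [if_neg (by rintro rfl; exact hx he)])).symm
    · have ha' : a ∈ rest := by cases ha with
        | head => exact absurd rfl hxa
        | tail _ h => exact h
      rw [PySem.List.index?_cons_of_ne rest hxa]
      obtain ⟨k, hk⟩ := Option.isSome_iff_exists.mp ((PySem.List.index?_isSome_iff rest a).mpr ha')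
      rw [hk]
      simp only [Option.map_some, Option.getD_some, List.map_cons, List.modify_succ_cons,
        if_neg hxa]
      have hih := ih hnd' ha'
      rw [hk] at hih
      simpa using hih

-- the invariant of A's counting loop vs dedupe+count
theorem pvLoopEq (xs : List String) : ∀ (stor : List String) (f : String → Int),
    stor.Nodup → (∀ e, e ∉ stor → f e = 0) →
    mtlistLoop xs (stor.map (fun e => (e, f e, ""))) stor
      = ((xs.foldl (fun s e => if e ∈ s then s else s ++ [e]) stor).map
          (fun e => (e, f e + (xs.count e : Int), "")),
         xs.foldl (fun s e => if e ∈ s then s else s ++ [e]) stor) := by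
  induction xs with
  | nil =>
    intro stor f _ _
    simp [mtlistLoop]
  | cons a rest ih =>
    intro stor f hnd hf
    by_cases ha : a ∈ stor
    · rw [mtlistLoop]
      rw [if_neg (by simpa using ha)]
      rw [pvModifyMap stor _ _ a hnd ha]
      have : (fun e => if e = a then (fun p : String × Int × String => (p.1, p.2.1 + 1, p.2.2)) ((e, f e, "")) else (e, f e, ""))
           = (fun e => (e, (fun x => if x = a then f x + 1 else f x) e, "")) := by
        funext e; by_cases h : e = a <;> simp [h]
      rw [this, ih stor _ hnd (fun e he => by rw [if_neg (by rintro rfl; exact he ha)]; exact hf e he)]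
      have hfold : (a :: rest).foldl (fun s e => if e ∈ s then s else s ++ [e]) stor
          = rest.foldl (fun s e => if e ∈ s then s else s ++ [e]) stor := by
        simp [List.foldl_cons, if_pos ha]
      rw [hfold] at *
      refine Prod.ext ?_ rfl
      refine List.map_congr_left (fun e _ => ?_)
      by_cases h : e = a
      · subst h; simp; ring
      · simp [h, List.count_cons, (by simpa using Ne.symm h : (a == e) = false)]
    · rw [mtlistLoop]
      rw [if_pos (by simpa using ha)]
      have h1 : (stor.map (fun e => (e, f e, ""))) ++ [(a, (1 : Int), "")]
          = (stor ++ [a]).map (fun e => (e, (fun x => if x = a then (1 : Int) else f x) e, "")) := by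
        rw [List.map_append]
        congr 1
        · exact List.map_congr_left (fun e he => by
            have hne : e ≠ a := by rintro rfl; exact ha he
            simp [hne])
        · simp
      rw [h1, ih (stor ++ [a]) _ (by
            simp [List.nodup_append, hnd]
            exact fun y hy h => ha (h ▸ hy))
          (fun e he => by
            simp only [List.mem_append, List.mem_singleton, not_or] at he
            rw [if_neg he.2]; exact hf e he.1)]
      have hfold : (a :: rest).foldl (fun s e => if e ∈ s then s else s ++ [e]) stor
          = rest.foldl (fun s e => if e ∈ s then s else s ++ [e]) (stor ++ [a]) := by
        simp [List.foldl_cons, if_neg ha]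
      rw [hfold]
      refine Prod.ext ?_ rfl
      refine List.map_congr_left (fun e _ => ?_)
      by_cases h : e = a
      · subst h; simp [hf e ha]; omega
      · simp [h, List.count_cons, (by simpa using Ne.symm h : (a == e) = false)]

theorem pvTempEq (listed : List String) :
    (mtlistLoop listed [] []).1
      = (listed.foldl (fun s e => if e ∈ s then s else s ++ [e]) []).map
          (fun e => (e, (listed.count e : Int), "")) := by
  have h := pvLoopEq listed [] (fun _ => 0) List.nodup_nil (fun _ _ => rfl)
  simp only [List.map_nil] at h
  rw [h]
  simp

-- the dedupe fold is PySem.Set.ofList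
theorem pvSeenEq (listed : List String) :
    listed.foldl (fun s e => if e ∈ s then s else s ++ [e]) [] = PySem.Set.ofList listed := by
  rw [PySem.Set.ofList_eq_foldl]
  refine PySem.List.foldl_congr_mem listed _ _ [] (fun s e _ => ?_)
  by_cases h : e ∈ s <;> simp [PySem.Set.add, h]

-- string plumbing
theorem pvToListNe (s : String) (h : s ≠ "") : s.toList ≠ [] := by
  intro hl; exact h (String.toList_inj.mp (by simp [hl]))
theorem pvNeOfToListNe (s : String) (h : s.toList ≠ []) : s ≠ "" := by
  intro he; exact h (by simp [he])

-- Python's  t[:-1]  strips the last char of the SUFFIX when the suffix is nonempty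
theorem pvSliceApp (a b : String) (hb : b ≠ "") :
    PySem.Str.slice (a ++ b) none (some (-1)) = a ++ PySem.Str.slice b none (some (-1)) := by
  apply String.toList_inj.mp
  rw [PySem.Str.slice_to_neg_one, String.toList_append, String.toList_append,
    PySem.Str.slice_to_neg_one, List.dropLast_append_of_ne_nil (pvToListNe b hb)]

-- the item block of tlist appends B's phrase to its accumulator
theorem pvItemTextEq (t name : String) (n : Int) (hname : name ≠ "") (hn : 1 ≤ n) :
    pvItemText t (name, n, "") = t ++ pvPhrase name n := by
  by_cases h1 : n = 1
  · subst h1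
    simp only [pvItemText, pvPhrase]
    norm_num
    split_ifs <;> rw [String.append_assoc]
  · have h2 : n > 1 := by omega
    have hlen : 1 ≤ name.toList.length := by
      have := pvToListNe name hname; cases hl : name.toList with
      | nil => exact absurd hl this | cons a l => simp
    simp only [pvItemText, pvPhrase, pvPlural, if_neg h1, if_pos h2]
    split_ifs with hes hy hee
    · simp [String.append_assoc]
    · -- ies, with the extra e/E slice; here name has at least 2 chars
      have hlen2 : 2 ≤ name.toList.length := by
        by_contra hcon
        have hl1 : name.toList.length = 1 := by omega
        obtain ⟨c, hc⟩ : ∃ c, name.toList = [c] := by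
          cases hl : name.toList with
          | nil => simp [hl] at hl1 | cons a l => cases l with
            | nil => exact ⟨a, rfl⟩ | cons b m => simp [hl] at hl1
        have hlenname : PySem.Str.len name = (1 : Int) := by
          rw [PySem.Str.len_eq, hc]; rfl
        rw [hlenname] at hy
        have hget1 : PySem.Str.pyGet? name (1 - 1) = some c := by
          rw [PySem.Str.pyGet?_eq, PySem.Chars.pyGet?_eq_listPyGet?, hc]
          norm_num [PySem.List.pyGet?_zero_cons]
        have hget2 : PySem.Str.pyGet? name (1 - 2) = some c := by
          rw [PySem.Str.pyGet?_eq, PySem.Chars.pyGet?_eq_listPyGet?, hc]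
          norm_num [PySem.List.pyGet?_neg_one]
        rw [hget1, hget2] at hy
        rcases hy with ⟨hy1, hy2⟩
        apply hy2
        simp only [Option.getD_some] at hy1 ⊢
        rcases hy1 with h | h <;> simp [pvYBlock, h]
      have hstem : PySem.Str.slice name none (some (-1)) ≠ "" := by
        apply pvNeOfToListNe
        rw [PySem.Str.slice_to_neg_one]
        intro hnil
        have hl := congrArg List.length hnil
        rw [List.length_dropLast] at hl
        simp only [List.length_nil] at hl
        omega
      rw [← String.append_assoc, ← String.append_assoc,
        pvSliceApp _ name hname, pvSliceApp _ _ hstem]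
      simp [String.append_assoc]
    · rw [← String.append_assoc, ← String.append_assoc, pvSliceApp _ name hname]
      simp [String.append_assoc]
    · simp [String.append_assoc]

-- concatenation of a list of strings (proof-side accumulator shape)
def pvConcat (l : List String) : String := l.foldr (· ++ ·) ""

theorem pvFoldAppend {α : Type} (g : α → String) (u : List α) : ∀ (t0 : String),
    u.foldl (fun t e => t ++ g e) t0 = t0 ++ pvConcat (u.map g) := by
  induction u with
  | nil => intro t0; simp [pvConcat]
  | cons x rest ih =>
    intro t0
    rw [List.foldl_cons, ih, List.map_cons]
    show _ = t0 ++ (g x ++ pvConcat (rest.map g))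
    rw [String.append_assoc]

theorem pvJoinSingle (sep x : String) : PySem.Str.join sep [x] = x := by
  apply String.toList_inj.mp
  rw [PySem.Str.toList_join, List.map_cons, List.map_nil, PySem.Chars.join_singleton]

theorem pvJoinCons (sep x y : String) (rest : List String) :
    PySem.Str.join sep (x :: y :: rest) = x ++ sep ++ PySem.Str.join sep (y :: rest) := by
  apply String.toList_inj.mp
  rw [PySem.Str.toList_join, List.map_cons, List.map_cons, PySem.Chars.join_cons_cons,
    String.toList_append, String.toList_append, PySem.Str.toList_join, List.map_cons]

theorem pvJoinSepAppend (sep : String) : ∀ (qs : List String), qs ≠ [] →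
    PySem.Str.join sep qs ++ sep = pvConcat (qs.map (· ++ sep)) := by
  intro qs
  induction qs with
  | nil => intro h; exact absurd rfl h
  | cons x rest ih =>
    intro _
    cases rest with
    | nil =>
      rw [pvJoinSingle]
      show x ++ sep = pvConcat [x ++ sep]
      simp [pvConcat]
    | cons y rest' =>
      rw [pvJoinCons, List.map_cons]
      show (x ++ sep ++ PySem.Str.join sep (y :: rest')) ++ sep = (x ++ sep) ++ pvConcat ((y :: rest').map (· ++ sep))
      rw [String.append_assoc, ih (by simp)]

-- a fold over range(k) indexing into l is a fold over l.take k
theorem pvFoldRangeGetD {α β : Type} (l : List α) (d : α) (F : β → α → β) :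
    ∀ (k : Nat), k ≤ l.length → ∀ (b : β),
    (List.range k).foldl (fun t i => F t (l.getD i d)) b = (l.take k).foldl F b := by
  intro k
  induction k with
  | zero => intro _ b; simp
  | succ k ih =>
    intro hk b
    have hk' : k < l.length := by omega
    rw [List.range_succ, List.foldl_append, ih (by omega), List.take_succ_eq_append_getElem hk',
      List.foldl_append]
    simp [List.getD, List.getElem?_eq_getElem hk']

theorem pvMultiCore (c : String → Int) (sep : String) (e1 e2 : String) (rest : List String)
    (hmem : ∀ e ∈ e1 :: e2 :: rest, e ≠ "" ∧ 1 ≤ c e) :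
    pvItemText
        (List.foldl
            (fun t i =>
              pvItemText t ((List.map (fun e => (e, c e, "")) (e1 :: e2 :: rest)).getD i ("", 0, "")) ++
                  ((List.map (fun e => (e, c e, "")) (e1 :: e2 :: rest)).getD i ("", 0, "")).2.2 ++ sep)
            "" (List.range ((e1 :: e2 :: rest).length - 1)) ++ "and ")
        ((List.map (fun e => (e, c e, "")) (e1 :: e2 :: rest)).getD ((e1 :: e2 :: rest).length - 1) ("", 0, "")) ++
      ((List.map (fun e => (e, c e, "")) (e1 :: e2 :: rest)).getD ((e1 :: e2 :: rest).length - 1) ("", 0, "")).2.2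
    = PySem.Str.join sep (PySem.List.slice (List.map (fun e => pvPhrase e (c e)) (e1 :: e2 :: rest)) none (some (-1))) ++ sep ++ "and "
        ++ PySem.List.pyGetD (List.map (fun e => pvPhrase e (c e)) (e1 :: e2 :: rest)) (-1) "" := by
  set u := e1 :: e2 :: rest with hu
  have hlt : u.length - 1 < (u.map (fun e => (e, c e, ""))).length := by simp [hu]
  rw [List.getD_eq_getElem _ _ hlt, List.getElem_map]
  obtain ⟨hne', hle'⟩ := hmem (u[u.length - 1]'(by simp [hu])) (List.getElem_mem _)
  rw [pvFoldRangeGetD (u.map (fun e => (e, c e, ""))) ("", 0, "")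
        (fun t e => pvItemText t e ++ e.2.2 ++ sep) (u.length - 1) (by simp) ""]
  rw [← List.map_take, ← List.dropLast_eq_take, List.foldl_map]
  rw [PySem.List.foldl_congr_mem u.dropLast _
        (fun t e => t ++ (pvPhrase e (c e) ++ sep)) ""
        (fun acc x hx => by
          obtain ⟨hne, hle⟩ := hmem x (List.mem_of_mem_dropLast hx)
          show pvItemText acc (x, c x, "") ++ "" ++ sep = acc ++ (pvPhrase x (c x) ++ sep)
          rw [pvItemTextEq acc x (c x) hne hle, String.append_empty, String.append_assoc])]
  rw [pvFoldAppend]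
  rw [PySem.List.slice_to_neg_one, ← List.map_dropLast,
      PySem.List.pyGetD_neg_one _ "" (by simp [hu]), List.getLast_eq_getElem, List.getElem_map]
  rw [pvJoinSepAppend sep _ (by simp [hu] : (u.dropLast.map (fun e => pvPhrase e (c e))) ≠ [])]
  simp only [List.length_map]
  rw [pvItemTextEq _ _ _ hne' hle']
  simp [List.map_map, Function.comp_def, String.append_assoc]

-- ===== VERDICT (by name: the statement is the Claim_ definition above) =====
theorem mtlist_spec : Claim_equal_mtlist := by
  intro listed _ hpre
  unfold Spec_mtlist mtlist mtlist_alt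
  rw [pvTempEq]
  simp only [pvSeenEq]
  have hco : ∀ e ∈ PySem.Set.ofList listed, (1:Int) ≤ (listed.count e : Int) := by
    intro e he
    have : 0 < listed.count e := List.count_pos_iff.mpr ((PySem.Set.mem_ofList listed e).mp he)
    exact_mod_cast this
  have hfinal : (List.map (fun e => (e, (listed.count e : Int), "")) (PySem.Set.ofList listed)).foldl
      (fun acc e => if e.2.1 > 0 ∧ e.1 ≠ "" then acc ++ [e] else acc) []
      = (List.filter (fun e => decide (e ≠ "")) (PySem.Set.ofList listed)).map
          (fun e => (e, (listed.count e : Int), "")) := by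
    rw [PySem.List.foldl_append_ite_eq_filter, List.nil_append, List.filter_map]
    congr 1
    apply List.filter_congr
    intro e he
    have h1 := hco e he
    simp only [Function.comp]
    by_cases h2 : e = "" <;> simp [h2]
    exact (PySem.Set.mem_ofList listed e).mp he
  simp only [pvTlist]
  rw [hfinal]
  clear hfinal
  have hmemN : ∀ e ∈ List.filter (fun e => decide (e ≠ "")) (PySem.Set.ofList listed),
      e ≠ "" ∧ (1:Int) ≤ (listed.count e : Int) := by
    intro e he
    exact ⟨by simpa using List.of_mem_filter he, hco e (List.mem_of_mem_filter he)⟩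
  rcases hN : List.filter (fun e => decide (e ≠ "")) (PySem.Set.ofList listed) with _ | ⟨e1, N'⟩
  · simp
  rcases N' with _ | ⟨e2, rest⟩
  · -- exactly one distinct nonempty element; Pre_ gives "" ∉ listed, so S = [e1]
    rw [hN] at hmemN
    obtain ⟨h1ne, h1c⟩ := hmemN e1 (by simp)
    have hno : "" ∉ listed := by
      intro h0
      exact hpre ⟨h0, by rw [hN]; rfl⟩
    have hSN : PySem.Set.ofList listed = [e1] := by
      rw [← hN]
      symm
      apply List.filter_eq_self.mpr
      intro x hx
      simp only [decide_eq_true_eq]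
      rintro rfl
      exact hno ((PySem.Set.mem_ofList listed "").mp hx)
    rw [hSN]
    norm_num
    rw [pvItemTextEq "" e1 _ h1ne h1c]
    simp
  · rw [hN] at hmemN
    rw [if_pos (by simp : (List.map (fun e => (e, (List.count e listed : Int), "")) (e1 :: e2 :: rest)).length > 1),
        if_neg (by simp : ¬ ((e1 :: e2 :: rest).isEmpty = true)),
        if_neg (by simp : ¬ ((List.map (fun e => pvPhrase e (List.count e listed : Int)) (e1 :: e2 :: rest)).length = 1))]
    simp only [List.length_map]
    by_cases hc : (e1 :: e2 :: rest).length > 2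
    · simp only [if_pos hc]
      exact pvMultiCore (fun e => (List.count e listed : Int)) ", " e1 e2 rest hmemN
    · simp only [if_neg hc]
      exact pvMultiCore (fun e => (List.count e listed : Int)) " " e1 e2 rest hmemN
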